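-- pv_equiv track=rewrite | github.com/Matth3wSmith/PythonSuli | Mester elte/Kezdő/Elemi/8 Mozi/mozi.py | iskolai
-- ===== SOURCE A (Python) =====
-- def iskolai(letszam):
--     if letszam>40:
--         return 5
--     else:
--         iskola={
--             5:0,
--             12:1,
--             20:2,
--             29:3,
--             41:4,
--         }
--         for kulcs in iskola:
--             if letszam<kulcs:
--                 return iskola[kulcs]*100
-- ===== SOURCE B (Python) =====
-- def iskolai(letszam):
--     if letszam > 40:
--         return 5
--     # binary search for the discount bucket among the strict upper thresholds
--     thresholds = (5, 12, 20, 29, 41)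
--     lo, hi = 0, 5
--     while lo < hi:
--         mid = (lo + hi) // 2
--         if letszam < thresholds[mid]:
--             hi = mid
--         else:
--             lo = mid + 1
--     return lo * 100
-- ===== Notes on version B (the rewrite author's own statement) =====
-- stated objective: alternative
-- what changed: Replaces the dict built per call and scanned linearly with a hand-written binary search over the sorted threshold tuple.
import Mathlib
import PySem

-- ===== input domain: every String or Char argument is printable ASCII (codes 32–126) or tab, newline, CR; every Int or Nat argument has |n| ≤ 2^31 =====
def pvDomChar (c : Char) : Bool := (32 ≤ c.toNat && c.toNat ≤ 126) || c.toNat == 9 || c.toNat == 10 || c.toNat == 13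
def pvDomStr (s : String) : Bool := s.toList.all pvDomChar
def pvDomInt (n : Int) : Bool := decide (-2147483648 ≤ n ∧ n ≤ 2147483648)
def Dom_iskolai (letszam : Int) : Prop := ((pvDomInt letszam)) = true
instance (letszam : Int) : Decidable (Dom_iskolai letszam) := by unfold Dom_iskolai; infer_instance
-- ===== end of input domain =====

-- B replaces A's per-call dict build + linear scan by a binary search over the sorted thresholds (alternative decomposition, same result).

-- ===== PORT A =====
-- the dict literal {5:0, 12:1, 20:2, 29:3, 41:4}
def iskolaDict : PySem.Dict Int Int :=
  (((((PySem.Dict.empty.insert 5 0).insert 12 1).insert 20 2).insert 29 3).insert 41 4)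

-- 'for kulcs in iskola: if letszam<kulcs: return iskola[kulcs]*100'
def iskolaiLoop (letszam : Int) (keys : List Int) : Option Int :=
  match keys with
  | [] => none
  | k :: rest => if letszam < k then some ((iskolaDict.getD k 0) * 100) else iskolaiLoop letszam rest

def iskolai (letszam : Int) : Int :=
  if letszam > 40 then 5
  else
    -- the loop always returns for an Int ≤ 40 (41 is a key); .getD 0 covers the unreachable fall-through
    (iskolaiLoop letszam iskolaDict.keys).getD 0

-- ===== PORT B =====
-- hand-written bisect_right over the threshold tuple; recursion on hi - lo mirrors 'while lo < hi'
def bThresholds : List Int := [5, 12, 20, 29, 41]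

def iskolaiBisect (letszam : Int) (lo hi : Nat) : Nat :=
  if lo < hi then
    let mid := (lo + hi) / 2
    if letszam < bThresholds.getD mid 0 then iskolaiBisect letszam lo mid
    else iskolaiBisect letszam (mid + 1) hi
  else lo
termination_by hi - lo
decreasing_by all_goals omega

def iskolai_alt (letszam : Int) : Int :=
  if letszam > 40 then 5
  else (iskolaiBisect letszam 0 5 : Int) * 100

-- ===== PRECONDITION & SPEC =====
def Spec_iskolai (letszam : Int) (out : Int) : Prop := out = iskolai_alt letszam
instance (letszam : Int) (out : Int) : Decidable (Spec_iskolai letszam out) := by unfold Spec_iskolai; infer_instance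

-- ===== CLAIM (what is proved, stated in full; the proofs are below) =====
def Claim_equal_iskolai : Prop := ∀ (letszam : Int), Dom_iskolai letszam → Spec_iskolai letszam (iskolai letszam)

-- ===== LEMMAS AND PROOFS =====
theorem iskolai_eval (letszam : Int) :
    iskolai letszam =
      if letszam > 40 then 5
      else if letszam < 5 then 0
      else if letszam < 12 then 100
      else if letszam < 20 then 200
      else if letszam < 29 then 300
      else if letszam < 41 then 400
      else 0 := by
  unfold iskolai
  by_cases h40 : letszam > 40
  · simp [h40]
  · by_cases h5 : letszam < 5 <;> by_cases h12 : letszam < 12 <;>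
      by_cases h20 : letszam < 20 <;> by_cases h29 : letszam < 29 <;>
      by_cases h41 : letszam < 41 <;>
      first
        | omega
        | simp [h40, h5, h12, h20, h29, h41, iskolaiLoop, iskolaDict,
            PySem.Dict.keys, PySem.Dict.getD, PySem.Dict.get?,
            PySem.Dict.insert, PySem.Dict.empty]

theorem iskolai_alt_eval (letszam : Int) :
    iskolai_alt letszam =
      if letszam > 40 then 5
      else if letszam < 5 then 0
      else if letszam < 12 then 100
      else if letszam < 20 then 200
      else if letszam < 29 then 300
      else if letszam < 41 then 400
      else 500 := by
  unfold iskolai_alt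
  by_cases h40 : letszam > 40
  · simp [h40]
  · by_cases h5 : letszam < 5 <;> by_cases h12 : letszam < 12 <;>
      by_cases h20 : letszam < 20 <;> by_cases h29 : letszam < 29 <;>
      by_cases h41 : letszam < 41 <;>
      first
        | omega
        | (simp only [h40, if_false, h5, h12, h20, h29, h41, if_true]
           repeat (rw [iskolaiBisect]; simp [bThresholds, h5, h12, h20, h29, h41]))

-- ===== VERDICT (by name: the statement is the Claim_ definition above) =====
theorem iskolai_spec : Claim_equal_iskolai := by
  intro letszam _
  unfold Spec_iskolai
  rw [iskolai_eval, iskolai_alt_eval]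
  split_ifs <;> first | rfl | omega
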